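-- pv_equiv track=rewrite | github.com/Cho-SangHyun/Algorithm-Study | 백준/14938-서강그라운드.py | solution
-- ===== SOURCE A (Python) =====
-- import heapq
--
-- def solution(n, m, r, items, edge_info):
--     graph = [[] for _ in range(n)]
--
--     for a, b, dist in edge_info:
--         graph[a - 1].append((b - 1, dist))
--         graph[b - 1].append((a - 1, dist))
--
--     answer = 0
--
--     for start in range(n):
--         distance = [987654321 for _ in range(n)]
--         distance[start] = 0
--         q = [(0, start)]
--         mid_answer = 0
--
--         while q:
--             dist, now = heapq.heappop(q)
--             if distance[now] < dist:
--                 continue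
--             for c_node, c_dist in graph[now]:
--                 if dist + c_dist < distance[c_node]:
--                     distance[c_node] = dist + c_dist
--                     heapq.heappush(q, (distance[c_node], c_node))
--
--         for i in range(n):
--             if distance[i] <= m:
--                 mid_answer += items[i]
--
--         answer = max(answer, mid_answer)
--
--     return answer
-- ===== SOURCE B (Python) =====
-- def solution(n, m, r, items, edge_info):
--     INF = 987654321
--     graph = [[] for _ in range(n)]
--     for a, b, w in edge_info:
--         graph[a - 1].append((b - 1, w))
--         graph[b - 1].append((a - 1, w))
--     best = 0
--     for start in range(n):
--         d = [INF] * n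
--         d[start] = 0
--         inq = [False] * n
--         inq[start] = True
--         q = [start]
--         qi = 0
--         while qi < len(q):
--             u = q[qi]
--             qi += 1
--             inq[u] = False
--             du = d[u]
--             for v, w in graph[u]:
--                 if du + w < d[v]:
--                     d[v] = du + w
--                     if not inq[v]:
--                         inq[v] = True
--                         q.append(v)
--         best = max(best, sum(items[i] for i in range(n) if d[i] <= m))
--     return best
-- ===== Notes on version B (the rewrite author's own statement) =====
-- stated objective: alternative
-- what changed: A runs Dijkstra with a lazy binary heap from every source; B replaces it with SPFA (queue-based Bellman-Ford label correcting): a plain FIFO worklist with in-queue flags, no priority queue and no (distance, node) heap entries.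
import Mathlib
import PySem

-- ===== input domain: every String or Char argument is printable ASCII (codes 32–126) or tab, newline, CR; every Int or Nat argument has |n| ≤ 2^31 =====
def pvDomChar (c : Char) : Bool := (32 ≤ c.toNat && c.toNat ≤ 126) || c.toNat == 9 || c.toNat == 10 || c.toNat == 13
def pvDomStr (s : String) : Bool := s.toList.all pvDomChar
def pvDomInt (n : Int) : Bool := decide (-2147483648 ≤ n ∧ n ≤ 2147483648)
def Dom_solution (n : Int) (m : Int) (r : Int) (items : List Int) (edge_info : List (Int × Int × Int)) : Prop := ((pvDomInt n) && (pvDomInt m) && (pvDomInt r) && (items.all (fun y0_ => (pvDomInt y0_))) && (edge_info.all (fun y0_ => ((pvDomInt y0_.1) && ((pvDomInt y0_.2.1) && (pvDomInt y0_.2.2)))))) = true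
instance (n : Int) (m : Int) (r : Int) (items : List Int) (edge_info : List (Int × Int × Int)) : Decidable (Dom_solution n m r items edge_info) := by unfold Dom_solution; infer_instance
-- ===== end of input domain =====

-- B replaces A's per-source lazy-heap Dijkstra by SPFA, the queue-based Bellman–Ford
-- label-correcting scheme (plain FIFO worklist + in-queue flags, no priority queue);
-- same return value on Pre_, no argument is mutated by either version.

-- Python index wrap for a valid index i of a list of length len (-len ≤ i < len, as Pre_ guarantees)
def pvIdx (len : Int) (i : Int) : Nat := (if i < 0 then i + len else i).toNat

-- ===== PORT A =====
-- adjacency lists, exactly A's construction loop (raw Python indices b-1 / a-1 are stored, as in A)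
def pvGraph (n : Int) (edge_info : List (Int × Int × Int)) : List (List (Int × Int)) :=
  edge_info.foldl (fun g e =>
    let ia := pvIdx n (e.1 - 1); let ib := pvIdx n (e.2.1 - 1)
    let g1 := g.set ia (g.getD ia [] ++ [(e.2.1 - 1, e.2.2)])
    g1.set ib (g1.getD ib [] ++ [(e.1 - 1, e.2.2)]))
  (List.replicate n.toNat [])

def pvLexLt (p q : Int × Int) : Bool := p.1 < q.1 || (p.1 == q.1 && p.2 < q.2)

def pvMinOf : Int × Int → List (Int × Int) → Int × Int
  | p, [] => p
  | p, x :: xs => pvMinOf (if pvLexLt x p then x else p) xs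

-- heapq.heappop: the heap is observationally a multiset whose pop returns its least tuple;
-- modelled as "take the lexicographic minimum, remove that one occurrence" (exact for heappop)
def pvPopMin? : List (Int × Int) → Option ((Int × Int) × List (Int × Int))
  | [] => none
  | x :: xs => let p := pvMinOf x xs; some (p, (x :: xs).erase p)

-- A's inner edge-relaxation for-loop over graph[now]
def pvRelax (nI : Int) (adj : List (Int × Int)) (dval : Int)
    (dq : List Int × List (Int × Int)) : List Int × List (Int × Int) :=
  adj.foldl (fun dq cw =>
    if dval + cw.2 < dq.1.getD (pvIdx nI cw.1) 0 then
      (dq.1.set (pvIdx nI cw.1) (dval + cw.2), dq.2 ++ [(dval + cw.2, cw.1)])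
    else dq) dq

-- A's while-loop; fuel is an upper bound on its iteration count, proved sufficient under Pre_
def pvDij (nI : Int) (graph : List (List (Int × Int))) :
    Nat → List Int → List (Int × Int) → List Int
  | 0, dist, _ => dist
  | fuel + 1, dist, q =>
    match pvPopMin? q with
    | none => dist
    | some (p, q1) =>
      if dist.getD (pvIdx nI p.2) 0 < p.1 then pvDij nI graph fuel dist q1
      else
        let s := pvRelax nI (graph.getD (pvIdx nI p.2) []) p.1 (dist, q1)
        pvDij nI graph fuel s.1 s.2

def solution (n : Int) (m : Int) (r : Int) (items : List Int) (edge_info : List (Int × Int × Int)) : Int :=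
  let graph := pvGraph n edge_info
  (List.range n.toNat).foldl (fun answer start =>
    let dist := pvDij n graph (2 * 987654321 * n + 2).toNat
      ((List.replicate n.toNat (987654321 : Int)).set start 0) [((0 : Int), (start : Int))]
    let mid := (List.range n.toNat).foldl
      (fun s i => if dist.getD i 0 ≤ m then s + items.getD i 0 else s) 0
    max answer mid) 0

-- ===== PORT B =====
-- B's inner edge-relaxation for-loop over graph[u] (du is the cached d[u]); state is
-- (d, queue-suffix, inq).  B's index-advancing queue q/qi is ported as the suffix q[qi:].
def pvRelaxB (nI : Int) (adj : List (Int × Int)) (dval : Int)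
    (s : List Int × List Int × List Bool) : List Int × List Int × List Bool :=
  adj.foldl (fun s cw =>
    if dval + cw.2 < s.1.getD (pvIdx nI cw.1) 0 then
      if s.2.2.getD (pvIdx nI cw.1) false = false then
        (s.1.set (pvIdx nI cw.1) (dval + cw.2), s.2.1 ++ [cw.1],
         s.2.2.set (pvIdx nI cw.1) true)
      else (s.1.set (pvIdx nI cw.1) (dval + cw.2), s.2.1, s.2.2)
    else s) s

-- B's worklist while-loop; fuel is an upper bound on its iteration count, proved sufficient under Pre_
def pvSPFA (nI : Int) (graph : List (List (Int × Int))) :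
    Nat → List Int → List Int → List Bool → List Int
  | 0, d, _, _ => d
  | fuel + 1, d, q, inq =>
    match q with
    | [] => d
    | u :: q1 =>
      let s := pvRelaxB nI (graph.getD (pvIdx nI u) []) (d.getD (pvIdx nI u) 0)
        (d, q1, inq.set (pvIdx nI u) false)
      pvSPFA nI graph fuel s.1 s.2.1 s.2.2

def solution_alt (n : Int) (m : Int) (r : Int) (items : List Int) (edge_info : List (Int × Int × Int)) : Int :=
  let graph := pvGraph n edge_info
  (List.range n.toNat).foldl (fun best start =>
    let d := pvSPFA n graph (2 * 987654321 * n + 2).toNat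
      ((List.replicate n.toNat (987654321 : Int)).set start 0)
      [(start : Int)]
      ((List.replicate n.toNat false).set start true)
    max best (((List.range n.toNat).filter (fun i => decide (d.getD i 0 ≤ m))).map
      (fun i => items.getD i 0)).sum) 0

-- ===== PRECONDITION & SPEC =====
-- Pre_ excludes only inputs on which A never returns: edges whose endpoints fall outside
-- Python's valid index range for the n lists (A raises IndexError); any negative edge weight
-- (an undirected negative edge is a negative cycle reachable from its own endpoint, so A's
-- Dijkstra loop never terminates); and item lists shorter than n when 0 <= m (then start = n-1
-- selects itself, items[n-1] is read and A raises IndexError; when m < 0 no item is read and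
-- such inputs stay inside Pre_).
def Pre_solution (n : Int) (m : Int) (r : Int) (items : List Int) (edge_info : List (Int × Int × Int)) : Prop :=
  (∀ e ∈ edge_info, 0 ≤ e.2.2 ∧ 1 - n ≤ e.1 ∧ e.1 ≤ n ∧ 1 - n ≤ e.2.1 ∧ e.2.1 ≤ n) ∧
  (n ≤ 0 → edge_info = []) ∧ (0 < n → n ≤ (items.length : Int) ∨ m < 0)
instance (n : Int) (m : Int) (r : Int) (items : List Int) (edge_info : List (Int × Int × Int)) : Decidable (Pre_solution n m r items edge_info) := by unfold Pre_solution; infer_instance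

def pvWitness_solution : Int × Int × Int × List Int × (List (Int × Int × Int)) :=
  (3, 5, 2, [10, 20, 30], [(1, 2, 3), (2, 3, 6)])

def Spec_solution (n : Int) (m : Int) (r : Int) (items : List Int) (edge_info : List (Int × Int × Int)) (out : Int) : Prop := out = solution_alt n m r items edge_info
instance (n : Int) (m : Int) (r : Int) (items : List Int) (edge_info : List (Int × Int × Int)) (out : Int) : Decidable (Spec_solution n m r items edge_info out) := by unfold Spec_solution; infer_instance

-- ===== CLAIM (what is proved, stated in full; the proofs are below) =====
def Claim_equal_solution : Prop := ∀ (n : Int) (m : Int) (r : Int) (items : List Int) (edge_info : List (Int × Int × Int)), Dom_solution n m r items edge_info → Pre_solution n m r items edge_info → Spec_solution n m r items edge_info (solution n m r items edge_info)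

-- ===== LEMMAS AND PROOFS =====

-- (u,v,w) is a directed (normalised-index) copy of an undirected input edge
def pvEdge (nI : Int) (es : List (Int × Int × Int)) (u v : Nat) (w : Int) : Prop :=
  ∃ e ∈ es, (u = pvIdx nI (e.1 - 1) ∧ v = pvIdx nI (e.2.1 - 1) ∧ w = e.2.2) ∨
            (u = pvIdx nI (e.2.1 - 1) ∧ v = pvIdx nI (e.1 - 1) ∧ w = e.2.2)

-- one edge relaxation, the common abstract step of both programs
def pvRel (nI : Int) (es : List (Int × Int × Int)) (d d' : List Int) : Prop :=
  ∃ u v w, pvEdge nI es u v w ∧ d.getD u 0 + w < d.getD v 0 ∧ d' = d.set v (d.getD u 0 + w)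

def pvStar (nI : Int) (es : List (Int × Int × Int)) : List Int → List Int → Prop :=
  Relation.ReflTransGen (pvRel nI es)

def pvStable (nI : Int) (es : List (Int × Int × Int)) (d : List Int) : Prop :=
  ∀ u v w, pvEdge nI es u v w → d.getD v 0 ≤ d.getD u 0 + w

def pvEOK (nI : Int) (es : List (Int × Int × Int)) : Prop :=
  ∀ e ∈ es, 0 ≤ e.2.2 ∧ pvIdx nI (e.1 - 1) < nI.toNat ∧ pvIdx nI (e.2.1 - 1) < nI.toNat

lemma getD_set' {α : Type} (l : List α) (v : Nat) (x : α) (i : Nat) (dflt : α) :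
    (l.set v x).getD i dflt = if v = i ∧ v < l.length then x else l.getD i dflt := by
  simp only [List.getD_eq_getElem?_getD, List.getElem?_set]
  split_ifs with h1 h2 h3 <;> simp_all <;> omega

lemma sum_set' (l : List Int) (v : Nat) (x : Int) (h : v < l.length) :
    (l.set v x).sum = l.sum + x - l.getD v 0 := by
  induction l generalizing v with
  | nil => simp at h
  | cons a t ih =>
    cases v with
    | zero => simp [List.set]; ring
    | succ k => simp at h; simp [List.set, ih k (by omega), List.getD]; ring

lemma getD_nonneg_of_mem (l : List Int) (i : Nat) (h : ∀ y ∈ l, 0 ≤ y) : 0 ≤ l.getD i 0 := by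
  by_cases hi : i < l.length
  · rw [List.getD_eq_getElem l 0 hi]; exact h _ (l.getElem_mem hi)
  · rw [List.getD_eq_default l 0 (by omega)]

lemma getD_replicate' {α : Type} (k i : Nat) (a dflt : α) :
    (List.replicate k a).getD i dflt = if i < k then a else dflt := by
  simp only [List.getD_eq_getElem?_getD, List.getElem?_replicate]
  split_ifs <;> simp

lemma star_length (nI : Int) (es : List (Int × Int × Int)) (d d' : List Int)
    (h : pvStar nI es d d') : d'.length = d.length := by
  induction h with
  | refl => rfl
  | tail _ hstep ih =>
    obtain ⟨u, v, w, _, _, rfl⟩ := hstep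
    simp [ih]

lemma star_le (nI : Int) (es : List (Int × Int × Int)) (d d' : List Int)
    (h : pvStar nI es d d') : ∀ i, d'.getD i 0 ≤ d.getD i 0 := by
  induction h with
  | refl => intro i; exact le_refl _
  | tail _ hstep ih =>
    intro i
    obtain ⟨u, v, w, _, hlt, rfl⟩ := hstep
    rw [getD_set']
    split_ifs with hc
    · rcases hc with ⟨hvi, -⟩
      subst hvi
      exact le_trans (le_of_lt hlt) (ih _)
    · exact ih i

lemma star_ge (nI : Int) (es : List (Int × Int × Int)) (e d d' : List Int)
    (he : pvStable nI es e) (hle : ∀ i, e.getD i 0 ≤ d.getD i 0)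
    (h : pvStar nI es d d') : ∀ i, e.getD i 0 ≤ d'.getD i 0 := by
  induction h with
  | refl => exact hle
  | tail _ hstep ih =>
    intro i
    obtain ⟨u, v, w, hE, hlt, rfl⟩ := hstep
    rw [getD_set']
    split_ifs with hc
    · obtain ⟨rfl, -⟩ := hc
      exact le_trans (he u v w hE) (by have := ih u; omega)
    · exact ih i

lemma star_stable_unique (nI : Int) (es : List (Int × Int × Int)) (d0 d1 d2 : List Int)
    (h1 : pvStar nI es d0 d1) (h2 : pvStar nI es d0 d2)
    (s1 : pvStable nI es d1) (s2 : pvStable nI es d2) : d1 = d2 := by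
  have hlen : d1.length = d2.length := by
    rw [star_length nI es d0 d1 h1, star_length nI es d0 d2 h2]
  have g1 : ∀ i, d1.getD i 0 ≤ d2.getD i 0 :=
    star_ge nI es d1 d0 d2 s1 (star_le nI es d0 d1 h1) h2
  have g2 : ∀ i, d2.getD i 0 ≤ d1.getD i 0 :=
    star_ge nI es d2 d0 d1 s2 (star_le nI es d0 d2 h2) h1
  apply List.ext_getElem hlen
  intro i hi1 hi2
  have := g1 i; have := g2 i
  rw [List.getD_eq_getElem d1 0 hi1, List.getD_eq_getElem d2 0 hi2] at *
  omega

lemma pvMinOf_mem : ∀ (xs : List (Int × Int)) (x : Int × Int), pvMinOf x xs ∈ x :: xs := by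
  intro xs
  induction xs with
  | nil => intro x; simp [pvMinOf]
  | cons y ys ih =>
    intro x
    have h := ih (if pvLexLt y x then y else x)
    rw [pvMinOf]
    rcases List.mem_cons.1 h with h1 | h1
    · rw [h1]; split_ifs <;> simp
    · simp [h1]

lemma pvPopMin?_none (q : List (Int × Int)) : pvPopMin? q = none ↔ q = [] := by
  cases q <;> simp [pvPopMin?]

lemma pvPopMin?_some (q : List (Int × Int)) (p : Int × Int) (q1 : List (Int × Int))
    (h : pvPopMin? q = some (p, q1)) :
    p ∈ q ∧ q1.length + 1 = q.length ∧ (∀ x ∈ q, x ≠ p → x ∈ q1) ∧ (∀ x ∈ q1, x ∈ q) := by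
  cases q with
  | nil => simp [pvPopMin?] at h
  | cons x xs =>
    simp only [pvPopMin?, Option.some.injEq, Prod.mk.injEq] at h
    obtain ⟨rfl, rfl⟩ := h
    have hpm : pvMinOf x xs ∈ x :: xs := pvMinOf_mem xs x
    refine ⟨hpm, ?_, ?_, ?_⟩
    · have := List.length_erase_of_mem hpm
      have hlen : 0 < (x :: xs).length := by simp
      omega
    · intro y hy hne
      exact (List.mem_erase_of_ne hne).2 hy
    · intro y hy
      exact List.mem_of_mem_erase hy

lemma mem_push (g : List (List (Int × Int))) (i j : Nat) (x y : Int × Int) (hi : i < g.length) :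
    (y ∈ (g.set i (g.getD i [] ++ [x])).getD j [] ↔ y ∈ g.getD j [] ∨ (j = i ∧ y = x)) := by
  rw [getD_set']
  split_ifs with hc
  · obtain ⟨h1, -⟩ := hc; subst h1; simp [eq_comm]
  · have hne : ¬ (i = j) := fun h => hc ⟨h, hi⟩
    constructor
    · exact Or.inl
    · rintro (h | ⟨rfl, -⟩)
      · exact h
      · exact absurd rfl hne

lemma graph_fold_mem (nI : Int) :
    ∀ (es : List (Int × Int × Int)) (g : List (List (Int × Int))),
    g.length = nI.toNat → pvEOK nI es → ∀ (j : Nat) (y : Int × Int),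
    (y ∈ (es.foldl (fun g e =>
      let ia := pvIdx nI (e.1 - 1); let ib := pvIdx nI (e.2.1 - 1)
      let g1 := g.set ia (g.getD ia [] ++ [(e.2.1 - 1, e.2.2)])
      g1.set ib (g1.getD ib [] ++ [(e.1 - 1, e.2.2)])) g).getD j [] ↔
    y ∈ g.getD j [] ∨ ∃ e ∈ es,
      (j = pvIdx nI (e.1 - 1) ∧ y = (e.2.1 - 1, e.2.2)) ∨
      (j = pvIdx nI (e.2.1 - 1) ∧ y = (e.1 - 1, e.2.2))) := by
  intro es
  induction es with
  | nil => intro g hg hE j y; simp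
  | cons e es ih =>
    intro g hg hE j y
    have hEe := hE e (by simp)
    have hEes : pvEOK nI es := fun e' h' => hE e' (by simp [h'])
    have hia : pvIdx nI (e.1 - 1) < g.length := by rw [hg]; exact hEe.2.1
    have hlen1 : (g.set (pvIdx nI (e.1 - 1)) (g.getD (pvIdx nI (e.1 - 1)) [] ++ [(e.2.1 - 1, e.2.2)])).length = g.length := by simp
    have hib : pvIdx nI (e.2.1 - 1) < (g.set (pvIdx nI (e.1 - 1)) (g.getD (pvIdx nI (e.1 - 1)) [] ++ [(e.2.1 - 1, e.2.2)])).length := by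
      rw [hlen1, hg]; exact hEe.2.2
    rw [List.foldl_cons]
    rw [ih _ (by simp only []; rw [List.length_set, hlen1, hg]) hEes j y]
    rw [mem_push _ _ _ _ _ hib, mem_push _ _ _ _ _ hia]
    simp only [List.mem_cons]
    constructor
    · rintro (((h | h) | h) | h)
      · exact Or.inl h
      · exact Or.inr ⟨e, Or.inl rfl, Or.inl h⟩
      · exact Or.inr ⟨e, Or.inl rfl, Or.inr h⟩
      · obtain ⟨e', he', ho⟩ := h
        exact Or.inr ⟨e', Or.inr he', ho⟩
    · rintro (h | ⟨e', (rfl | he'), ho⟩)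
      · exact Or.inl (Or.inl (Or.inl h))
      · rcases ho with h | h
        · exact Or.inl (Or.inl (Or.inr h))
        · exact Or.inl (Or.inr h)
      · exact Or.inr ⟨e', he', ho⟩

lemma graph_mem (nI : Int) (es : List (Int × Int × Int)) (hE : pvEOK nI es) (j : Nat) (y : Int × Int) :
    (y ∈ (pvGraph nI es).getD j [] ↔ ∃ e ∈ es,
      (j = pvIdx nI (e.1 - 1) ∧ y = (e.2.1 - 1, e.2.2)) ∨
      (j = pvIdx nI (e.2.1 - 1) ∧ y = (e.1 - 1, e.2.2))) := by
  have h := graph_fold_mem nI es (List.replicate nI.toNat []) (by simp) hE j y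
  rw [pvGraph, h]
  have : (List.replicate nI.toNat ([] : List (Int × Int))).getD j [] = [] := by
    rcases lt_or_ge j nI.toNat with hj | hj
    · rw [List.getD_eq_getElem _ _ (by simpa using hj)]; simp
    · rw [List.getD_eq_default _ _ (by simpa using hj)]
  rw [this]
  simp

lemma edge_bounds (nI : Int) (es : List (Int × Int × Int)) (hE : pvEOK nI es)
    (u v : Nat) (w : Int) (h : pvEdge nI es u v w) : u < nI.toNat ∧ v < nI.toNat ∧ 0 ≤ w := by
  obtain ⟨e, he, ho⟩ := h
  have := hE e he
  rcases ho with ⟨rfl, rfl, rfl⟩ | ⟨rfl, rfl, rfl⟩ <;> tauto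

lemma adj_edge (nI : Int) (es : List (Int × Int × Int)) (hE : pvEOK nI es)
    (u : Nat) (cw : Int × Int) (h : cw ∈ (pvGraph nI es).getD u []) :
    pvEdge nI es u (pvIdx nI cw.1) cw.2 ∧ pvIdx nI cw.1 < nI.toNat ∧ 0 ≤ cw.2 := by
  rw [graph_mem nI es hE] at h
  obtain ⟨e, he, ho⟩ := h
  have hEe := hE e he
  rcases ho with ⟨rfl, rfl⟩ | ⟨rfl, rfl⟩
  · exact ⟨⟨e, he, Or.inl ⟨rfl, rfl, rfl⟩⟩, hEe.2.2, hEe.1⟩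
  · exact ⟨⟨e, he, Or.inr ⟨rfl, rfl, rfl⟩⟩, hEe.2.1, hEe.1⟩

lemma edge_adj (nI : Int) (es : List (Int × Int × Int)) (hE : pvEOK nI es)
    (u v : Nat) (w : Int) (h : pvEdge nI es u v w) :
    ∃ c : Int, (c, w) ∈ (pvGraph nI es).getD u [] ∧ pvIdx nI c = v := by
  obtain ⟨e, he, ho⟩ := h
  rcases ho with ⟨rfl, rfl, rfl⟩ | ⟨rfl, rfl, rfl⟩
  · exact ⟨e.2.1 - 1, (graph_mem nI es hE _ _).2 ⟨e, he, Or.inl ⟨rfl, rfl⟩⟩, rfl⟩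
  · exact ⟨e.1 - 1, (graph_mem nI es hE _ _).2 ⟨e, he, Or.inr ⟨rfl, rfl⟩⟩, rfl⟩

-- state carried by A's inner relaxation fold
def pvQInv (nI : Int) (d : List Int) (q : List (Int × Int)) : Prop :=
  ∀ p ∈ q, d.getD (pvIdx nI p.2) 0 ≤ p.1 ∧ 0 ≤ p.1 ∧ pvIdx nI p.2 < nI.toNat

lemma relax_fold (nI : Int) (es : List (Int × Int × Int)) (c0 : Nat) (dval : Int) :
    ∀ (adj : List (Int × Int)) (d : List Int) (q : List (Int × Int)),
    (∀ cw ∈ adj, pvEdge nI es c0 (pvIdx nI cw.1) cw.2 ∧ pvIdx nI cw.1 < nI.toNat ∧ 0 ≤ cw.2) →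
    d.length = nI.toNat → (∀ y ∈ d, 0 ≤ y) → d.getD c0 0 = dval → pvQInv nI d q →
    (pvRelax nI adj dval (d, q)).1.length = nI.toNat ∧
    (∀ y ∈ (pvRelax nI adj dval (d, q)).1, 0 ≤ y) ∧
    pvStar nI es d (pvRelax nI adj dval (d, q)).1 ∧
    (∀ i, (pvRelax nI adj dval (d, q)).1.getD i 0 ≤ d.getD i 0) ∧
    (pvRelax nI adj dval (d, q)).1.getD c0 0 = dval ∧
    pvQInv nI (pvRelax nI adj dval (d, q)).1 (pvRelax nI adj dval (d, q)).2 ∧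
    (∀ x ∈ q, x ∈ (pvRelax nI adj dval (d, q)).2) ∧
    (∀ cw ∈ adj, (pvRelax nI adj dval (d, q)).1.getD (pvIdx nI cw.1) 0 ≤ dval + cw.2) ∧
    (∀ c : Nat, (pvRelax nI adj dval (d, q)).1.getD c 0 < d.getD c 0 →
      ∃ p ∈ (pvRelax nI adj dval (d, q)).2, pvIdx nI p.2 = c ∧
        p.1 = (pvRelax nI adj dval (d, q)).1.getD c 0) ∧
    2 * (pvRelax nI adj dval (d, q)).1.sum + ((pvRelax nI adj dval (d, q)).2.length : Int) ≤
      2 * d.sum + (q.length : Int) := by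
  intro adj
  induction adj with
  | nil =>
    intro d q hadj hlen hnn hc0 hq
    simp only [pvRelax, List.foldl_nil]
    exact ⟨hlen, hnn, Relation.ReflTransGen.refl, fun i => le_refl _, hc0, hq,
      fun x hx => hx, fun cw h => by simp at h, fun c hc => absurd hc (by omega), le_refl _⟩
  | cons cw adj ih =>
    intro d q hadj hlen hnn hc0 hq
    obtain ⟨hEdge, hvlt, hw⟩ := hadj cw (by simp)
    have hdval : 0 ≤ dval := hc0 ▸ getD_nonneg_of_mem d c0 hnn
    have hstep : pvRelax nI (cw :: adj) dval (d, q) =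
        pvRelax nI adj dval (if dval + cw.2 < d.getD (pvIdx nI cw.1) 0 then
          (d.set (pvIdx nI cw.1) (dval + cw.2), q ++ [(dval + cw.2, cw.1)]) else (d, q)) := by
      simp only [pvRelax, List.foldl_cons]
    by_cases hcond : dval + cw.2 < d.getD (pvIdx nI cw.1) 0
    · rw [hstep, if_pos hcond]
      set v := pvIdx nI cw.1 with hv
      set d' := d.set v (dval + cw.2) with hd'
      set q' := q ++ [(dval + cw.2, cw.1)] with hq'
      have hvne : v ≠ c0 := by
        intro h; rw [h, hc0] at hcond; omega
      have hlen' : d'.length = nI.toNat := by simp [hd', hlen]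
      have hnn' : ∀ y ∈ d', 0 ≤ y := by
        intro y hy
        rcases List.mem_or_eq_of_mem_set hy with h | h
        · exact hnn y h
        · omega
      have hled : ∀ i, d'.getD i 0 ≤ d.getD i 0 := by
        intro i; rw [hd', getD_set']; split_ifs with h
        · obtain ⟨h1, -⟩ := h; rw [← h1]; omega
        · exact le_refl _
      have hc0' : d'.getD c0 0 = dval := by
        rw [hd', getD_set', if_neg (by tauto), hc0]
      have hdv' : d'.getD v 0 = dval + cw.2 := by
        rw [hd', getD_set', if_pos ⟨rfl, by omega⟩]
      have hq'inv : pvQInv nI d' q' := by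
        intro p hp
        rcases List.mem_append.1 hp with h | h
        · obtain ⟨h1, h2, h3⟩ := hq p h
          exact ⟨le_trans (hled _) h1, h2, h3⟩
        · have hpe : p = (dval + cw.2, cw.1) := by simpa using h
          subst hpe
          exact ⟨le_of_eq hdv', by omega, hvlt⟩
      obtain ⟨R1, R2, R3, R4, R5, R6, R7, R8, R9, R10⟩ :=
        ih d' q' (fun x hx => hadj x (by simp [hx])) hlen' hnn' hc0' hq'inv
      have hrel : pvRel nI es d d' := by
        refine ⟨c0, v, cw.2, hEdge, by rw [hc0]; exact hcond, by rw [hd', hc0]⟩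
      refine ⟨R1, R2, Relation.ReflTransGen.head hrel R3,
        fun i => le_trans (R4 i) (hled i), R5, R6,
        fun x hx => R7 x (List.mem_append.2 (Or.inl hx)), ?_, ?_, ?_⟩
      · intro cw' hcw'
        rcases List.mem_cons.1 hcw' with h | h
        · subst h; exact le_trans (R4 v) (le_of_eq hdv')
        · exact R8 cw' h
      · intro c hc
        by_cases h2 : (pvRelax nI adj dval (d', q')).1.getD c 0 < d'.getD c 0
        · exact R9 c h2
        · have heq : (pvRelax nI adj dval (d', q')).1.getD c 0 = d'.getD c 0 := by
            have := R4 c; omega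
          have hlt : d'.getD c 0 < d.getD c 0 := by omega
          have hcv : c = v := by
            by_contra hne
            rw [hd', getD_set', if_neg (by tauto)] at hlt; omega
          subst hcv
          refine ⟨(dval + cw.2, cw.1), R7 _ (List.mem_append.2 (Or.inr (by simp))), rfl, ?_⟩
          rw [heq, hdv']
      · have hsum : d'.sum = d.sum + (dval + cw.2) - d.getD v 0 := by
          rw [hd']; exact sum_set' d v _ (by omega)
        have : (q'.length : Int) = (q.length : Int) + 1 := by simp [hq']
        omega
    · rw [hstep, if_neg hcond]
      obtain ⟨R1, R2, R3, R4, R5, R6, R7, R8, R9, R10⟩ :=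
        ih d q (fun x hx => hadj x (by simp [hx])) hlen hnn hc0 hq
      refine ⟨R1, R2, R3, R4, R5, R6, R7, ?_, R9, R10⟩
      intro cw' hcw'
      rcases List.mem_cons.1 hcw' with h | h
      · subst h; exact le_trans (R4 _) (by omega)
      · exact R8 cw' h

-- invariant of A's while-loop
def pvDInv (nI : Int) (es : List (Int × Int × Int)) (d0 d : List Int) (q : List (Int × Int)) : Prop :=
  d.length = nI.toNat ∧ (∀ y ∈ d, 0 ≤ y) ∧ pvStar nI es d0 d ∧ pvQInv nI d q ∧
  (∀ c : Nat, c < nI.toNat →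
    (∃ p ∈ q, pvIdx nI p.2 = c ∧ p.1 = d.getD c 0) ∨
    (∀ u v w, pvEdge nI es u v w → u = c → d.getD v 0 ≤ d.getD c 0 + w))

lemma dij_good (nI : Int) (es : List (Int × Int × Int)) (hE : pvEOK nI es) (d0 : List Int) :
    ∀ (fuel : Nat) (d : List Int) (q : List (Int × Int)), pvDInv nI es d0 d q →
    (2 * d.sum).toNat + q.length < fuel →
    pvStar nI es d0 (pvDij nI (pvGraph nI es) fuel d q) ∧
    pvStable nI es (pvDij nI (pvGraph nI es) fuel d q) ∧
    (pvDij nI (pvGraph nI es) fuel d q).length = nI.toNat := by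
  intro fuel
  induction fuel with
  | zero => intro d q _ hf; omega
  | succ fuel ih =>
    intro d q hInv hf
    obtain ⟨hlen, hnn, hstar, hqinv, hcover⟩ := hInv
    cases hpop : pvPopMin? q with
    | none =>
      have hqe : q = [] := (pvPopMin?_none q).1 hpop
      rw [pvDij, hpop]
      refine ⟨hstar, ?_, hlen⟩
      intro u v w hEdge
      have hu := (edge_bounds nI es hE u v w hEdge).1
      rcases hcover u hu with ⟨p, hp, -⟩ | h
      · rw [hqe] at hp; simp at hp
      · exact h u v w hEdge rfl
    | some pq =>
      obtain ⟨p, q1⟩ := pq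
      obtain ⟨hpmem, hlenq, hkeep, hsub⟩ := pvPopMin?_some q p q1 hpop
      obtain ⟨hp1, hp0, hpn⟩ := hqinv p hpmem
      simp only [pvDij, hpop]
      by_cases hskip : d.getD (pvIdx nI p.2) 0 < p.1
      · rw [if_pos hskip]
        apply ih d q1 ⟨hlen, hnn, hstar, fun x hx => hqinv x (hsub x hx), ?_⟩ (by omega)
        intro c hc
        rcases hcover c hc with ⟨x, hxq, hx2, hx3⟩ | h
        · left
          refine ⟨x, hkeep x hxq ?_, hx2, hx3⟩
          intro hxp; subst hxp; rw [hx2, hx3] at hskip; omega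
        · exact Or.inr h
      · rw [if_neg hskip]
        have heq : d.getD (pvIdx nI p.2) 0 = p.1 := by omega
        set c0 := pvIdx nI p.2 with hc0def
        have hadj : ∀ cw ∈ (pvGraph nI es).getD c0 [],
            pvEdge nI es c0 (pvIdx nI cw.1) cw.2 ∧ pvIdx nI cw.1 < nI.toNat ∧ 0 ≤ cw.2 :=
          fun cw h => adj_edge nI es hE c0 cw h
        obtain ⟨R1, R2, R3, R4, R5, R6, R7, R8, R9, R10⟩ :=
          relax_fold nI es c0 p.1 ((pvGraph nI es).getD c0 []) d q1 hadj hlen hnn heq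
            (fun x hx => hqinv x (hsub x hx))
        apply ih _ _ ⟨R1, R2, Relation.ReflTransGen.trans hstar R3, R6, ?_⟩ ?_
        · intro c hc
          by_cases hcc : c = c0
          · subst hcc
            right
            intro u v w hEdge hu
            subst hu
            obtain ⟨cN, hmem, hidx⟩ := edge_adj nI es hE c0 v w hEdge
            have := R8 (cN, w) hmem
            rw [hidx] at this
            rw [R5]; exact this
          · by_cases hlt : (pvRelax nI ((pvGraph nI es).getD c0 []) p.1 (d, q1)).1.getD c 0 < d.getD c 0
            · obtain ⟨x, hx1, hx2, hx3⟩ := R9 c hlt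
              exact Or.inl ⟨x, hx1, hx2, hx3⟩
            · have heqc : (pvRelax nI ((pvGraph nI es).getD c0 []) p.1 (d, q1)).1.getD c 0 = d.getD c 0 := by
                have := R4 c; omega
              rcases hcover c hc with ⟨x, hxq, hx2, hx3⟩ | h
              · left
                have hxp : x ≠ p := fun hxp => hcc (by rw [← hx2, hxp])
                refine ⟨x, R7 x (hkeep x hxq hxp), hx2, by rw [hx3, heqc]⟩
              · right
                intro u v w hEdge hu; subst hu
                calc (pvRelax nI ((pvGraph nI es).getD c0 []) p.1 (d, q1)).1.getD v 0
                    ≤ d.getD v 0 := R4 v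
                  _ ≤ d.getD u 0 + w := h u v w hEdge rfl
                  _ = (pvRelax nI ((pvGraph nI es).getD c0 []) p.1 (d, q1)).1.getD u 0 + w := by
                      rw [heqc]
        · have hs1 : 0 ≤ (pvRelax nI ((pvGraph nI es).getD c0 []) p.1 (d, q1)).1.sum :=
            List.sum_nonneg R2
          have hs0 : 0 ≤ d.sum := List.sum_nonneg hnn
          omega

lemma relaxB_fold (nI : Int) (es : List (Int × Int × Int)) (c0 : Nat) (dval : Int) :
    ∀ (adj : List (Int × Int)) (d : List Int) (q : List Int) (inq : List Bool),
    (∀ cw ∈ adj, pvEdge nI es c0 (pvIdx nI cw.1) cw.2 ∧ pvIdx nI cw.1 < nI.toNat ∧ 0 ≤ cw.2) →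
    d.length = nI.toNat → (∀ y ∈ d, 0 ≤ y) → d.getD c0 0 = dval →
    (∀ x ∈ q, pvIdx nI x < nI.toNat) →
    (∀ c : Nat, inq.getD c false = true → ∃ x ∈ q, pvIdx nI x = c) →
    (pvRelaxB nI adj dval (d, q, inq)).1.length = nI.toNat ∧
    (∀ y ∈ (pvRelaxB nI adj dval (d, q, inq)).1, 0 ≤ y) ∧
    pvStar nI es d (pvRelaxB nI adj dval (d, q, inq)).1 ∧
    (∀ i, (pvRelaxB nI adj dval (d, q, inq)).1.getD i 0 ≤ d.getD i 0) ∧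
    (pvRelaxB nI adj dval (d, q, inq)).1.getD c0 0 = dval ∧
    (∀ x ∈ (pvRelaxB nI adj dval (d, q, inq)).2.1, pvIdx nI x < nI.toNat) ∧
    (∀ c : Nat, (pvRelaxB nI adj dval (d, q, inq)).2.2.getD c false = true →
      ∃ x ∈ (pvRelaxB nI adj dval (d, q, inq)).2.1, pvIdx nI x = c) ∧
    (∀ x ∈ q, x ∈ (pvRelaxB nI adj dval (d, q, inq)).2.1) ∧
    (∀ cw ∈ adj, (pvRelaxB nI adj dval (d, q, inq)).1.getD (pvIdx nI cw.1) 0 ≤ dval + cw.2) ∧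
    (∀ c : Nat, (pvRelaxB nI adj dval (d, q, inq)).1.getD c 0 < d.getD c 0 →
      ∃ x ∈ (pvRelaxB nI adj dval (d, q, inq)).2.1, pvIdx nI x = c) ∧
    2 * (pvRelaxB nI adj dval (d, q, inq)).1.sum +
      ((pvRelaxB nI adj dval (d, q, inq)).2.1.length : Int) ≤
      2 * d.sum + (q.length : Int) := by
  intro adj
  induction adj with
  | nil =>
    intro d q inq hadj hlen hnn hc0 hqv hflag
    simp only [pvRelaxB, List.foldl_nil]
    exact ⟨hlen, hnn, Relation.ReflTransGen.refl, fun i => le_refl _, hc0, hqv, hflag,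
      fun x hx => hx, fun cw h => by simp at h, fun c hc => absurd hc (by omega), le_refl _⟩
  | cons cw adj ih =>
    intro d q inq hadj hlen hnn hc0 hqv hflag
    obtain ⟨hEdge, hvlt, hw⟩ := hadj cw (by simp)
    have hdval : 0 ≤ dval := hc0 ▸ getD_nonneg_of_mem d c0 hnn
    by_cases hcond : dval + cw.2 < d.getD (pvIdx nI cw.1) 0
    · set v := pvIdx nI cw.1 with hv
      set d' := d.set v (dval + cw.2) with hd'
      have hvne : v ≠ c0 := by
        intro h; rw [h, hc0] at hcond; omega
      have hlen' : d'.length = nI.toNat := by simp [hd', hlen]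
      have hnn' : ∀ y ∈ d', 0 ≤ y := by
        intro y hy
        rcases List.mem_or_eq_of_mem_set hy with h | h
        · exact hnn y h
        · omega
      have hled : ∀ i, d'.getD i 0 ≤ d.getD i 0 := by
        intro i; rw [hd', getD_set']; split_ifs with h
        · obtain ⟨h1, -⟩ := h; rw [← h1]; omega
        · exact le_refl _
      have hc0' : d'.getD c0 0 = dval := by
        rw [hd', getD_set', if_neg (by tauto), hc0]
      have hdv' : d'.getD v 0 = dval + cw.2 := by
        rw [hd', getD_set', if_pos ⟨rfl, by omega⟩]
      have hrel : pvRel nI es d d' := ⟨c0, v, cw.2, hEdge, by rw [hc0]; exact hcond, by rw [hd', hc0]⟩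
      have hsum' : d'.sum = d.sum + (dval + cw.2) - d.getD v 0 := by
        rw [hd']; exact sum_set' d v _ (by omega)
      by_cases hflg : inq.getD v false = false
      · have hstep : pvRelaxB nI (cw :: adj) dval (d, q, inq) =
            pvRelaxB nI adj dval (d', q ++ [cw.1], inq.set v true) := by
          simp only [pvRelaxB, List.foldl_cons, ← hv, if_pos hcond, hflg, ← hd', if_true]
        rw [hstep]
        have hqv' : ∀ x ∈ q ++ [cw.1], pvIdx nI x < nI.toNat := by
          intro x hx
          rcases List.mem_append.1 hx with h | h
          · exact hqv x h
          · have : x = cw.1 := by simpa using h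
            rw [this]; exact hvlt
        have hflag' : ∀ c : Nat, (inq.set v true).getD c false = true →
            ∃ x ∈ q ++ [cw.1], pvIdx nI x = c := by
          intro c hcflag
          rw [getD_set'] at hcflag
          split_ifs at hcflag with hvc
          · exact ⟨cw.1, List.mem_append.2 (Or.inr (by simp)), hvc.1⟩
          · obtain ⟨x, hx1, hx2⟩ := hflag c hcflag
            exact ⟨x, List.mem_append.2 (Or.inl hx1), hx2⟩
        obtain ⟨R1, R2, R3, R4, R5, R6, R7, R8, R9, R10, R11⟩ :=
          ih d' (q ++ [cw.1]) (inq.set v true) (fun x hx => hadj x (by simp [hx]))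
            hlen' hnn' hc0' hqv' hflag'
        refine ⟨R1, R2, Relation.ReflTransGen.head hrel R3,
          fun i => le_trans (R4 i) (hled i), R5, R6, R7,
          fun x hx => R8 x (List.mem_append.2 (Or.inl hx)), ?_, ?_, ?_⟩
        · intro cw' hcw'
          rcases List.mem_cons.1 hcw' with h | h
          · subst h; exact le_trans (R4 v) (le_of_eq hdv')
          · exact R9 cw' h
        · intro c hc
          by_cases h2 : (pvRelaxB nI adj dval (d', q ++ [cw.1], inq.set v true)).1.getD c 0 < d'.getD c 0
          · exact R10 c h2
          · have hlt : d'.getD c 0 < d.getD c 0 := by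
              have := R4 c; omega
            have hcv : c = v := by
              by_contra hne
              rw [hd', getD_set', if_neg (by tauto)] at hlt; omega
            subst hcv
            exact ⟨cw.1, R8 _ (List.mem_append.2 (Or.inr (by simp))), rfl⟩
        · have hql : ((q ++ [cw.1]).length : Int) = (q.length : Int) + 1 := by simp
          omega
      · have hflgT : inq.getD v false = true := by
          cases h : inq.getD v false
          · exact absurd h hflg
          · rfl
        have hstep : pvRelaxB nI (cw :: adj) dval (d, q, inq) =
            pvRelaxB nI adj dval (d', q, inq) := by
          simp only [pvRelaxB, List.foldl_cons, ← hv, if_pos hcond, hflgT, ← hd', Bool.true_eq_false, if_false]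
        rw [hstep]
        obtain ⟨R1, R2, R3, R4, R5, R6, R7, R8, R9, R10, R11⟩ :=
          ih d' q inq (fun x hx => hadj x (by simp [hx])) hlen' hnn' hc0' hqv hflag
        refine ⟨R1, R2, Relation.ReflTransGen.head hrel R3,
          fun i => le_trans (R4 i) (hled i), R5, R6, R7, R8, ?_, ?_, by omega⟩
        · intro cw' hcw'
          rcases List.mem_cons.1 hcw' with h | h
          · subst h; exact le_trans (R4 v) (le_of_eq hdv')
          · exact R9 cw' h
        · intro c hc
          by_cases h2 : (pvRelaxB nI adj dval (d', q, inq)).1.getD c 0 < d'.getD c 0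
          · exact R10 c h2
          · have hlt : d'.getD c 0 < d.getD c 0 := by
              have := R4 c; omega
            have hcv : c = v := by
              by_contra hne
              rw [hd', getD_set', if_neg (by tauto)] at hlt; omega
            subst hcv
            obtain ⟨x, hx1, hx2⟩ := hflag v hflgT
            exact ⟨x, R8 x hx1, hx2⟩
    · have hstep : pvRelaxB nI (cw :: adj) dval (d, q, inq) =
          pvRelaxB nI adj dval (d, q, inq) := by
        simp only [pvRelaxB, List.foldl_cons, if_neg hcond]
      rw [hstep]
      obtain ⟨R1, R2, R3, R4, R5, R6, R7, R8, R9, R10, R11⟩ :=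
        ih d q inq (fun x hx => hadj x (by simp [hx])) hlen hnn hc0 hqv hflag
      refine ⟨R1, R2, R3, R4, R5, R6, R7, R8, ?_, R10, R11⟩
      intro cw' hcw'
      rcases List.mem_cons.1 hcw' with h | h
      · subst h; exact le_trans (R4 _) (by omega)
      · exact R9 cw' h

-- invariant of B's while-loop
def pvDInvB (nI : Int) (es : List (Int × Int × Int)) (d0 d : List Int)
    (q : List Int) (inq : List Bool) : Prop :=
  d.length = nI.toNat ∧ (∀ y ∈ d, 0 ≤ y) ∧ pvStar nI es d0 d ∧
  (∀ x ∈ q, pvIdx nI x < nI.toNat) ∧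
  (∀ c : Nat, inq.getD c false = true → ∃ x ∈ q, pvIdx nI x = c) ∧
  (∀ c : Nat, c < nI.toNat →
    (∃ x ∈ q, pvIdx nI x = c) ∨
    (∀ u v w, pvEdge nI es u v w → u = c → d.getD v 0 ≤ d.getD c 0 + w))

lemma spfa_good (nI : Int) (es : List (Int × Int × Int)) (hE : pvEOK nI es) (d0 : List Int) :
    ∀ (fuel : Nat) (d : List Int) (q : List Int) (inq : List Bool), pvDInvB nI es d0 d q inq →
    (2 * d.sum).toNat + q.length < fuel →
    pvStar nI es d0 (pvSPFA nI (pvGraph nI es) fuel d q inq) ∧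
    pvStable nI es (pvSPFA nI (pvGraph nI es) fuel d q inq) ∧
    (pvSPFA nI (pvGraph nI es) fuel d q inq).length = nI.toNat := by
  intro fuel
  induction fuel with
  | zero => intro d q inq _ hf; omega
  | succ fuel ih =>
    intro d q inq hInv hf
    obtain ⟨hlen, hnn, hstar, hqv, hflag, hcover⟩ := hInv
    cases q with
    | nil =>
      rw [pvSPFA]
      refine ⟨hstar, ?_, hlen⟩
      intro u v w hEdge
      have hu := (edge_bounds nI es hE u v w hEdge).1
      rcases hcover u hu with ⟨x, hx, -⟩ | h
      · simp at hx
      · exact h u v w hEdge rfl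
    | cons u q1 =>
      rw [pvSPFA]
      set c0 := pvIdx nI u with hc0def
      have hc0lt : c0 < nI.toNat := hqv u (by simp)
      have hflag1 : ∀ c : Nat, (inq.set c0 false).getD c false = true →
          ∃ x ∈ q1, pvIdx nI x = c := by
        intro c hc
        rw [getD_set'] at hc
        split_ifs at hc with hvc
        obtain ⟨x, hx1, hx2⟩ := hflag c hc
        rcases List.mem_cons.1 hx1 with h | h
        · exfalso
          subst h
          by_cases hcl : c0 < inq.length
          · exact hvc ⟨hx2, hcl⟩
          · rw [← hx2, List.getD_eq_default _ _ (by omega)] at hc; simp at hc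
        · exact ⟨x, h, hx2⟩
      obtain ⟨R1, R2, R3, R4, R5, R6, R7, R8, R9, R10, R11⟩ :=
        relaxB_fold nI es c0 (d.getD c0 0) ((pvGraph nI es).getD c0 []) d q1
          (inq.set c0 false) (fun cw h => adj_edge nI es hE c0 cw h) hlen hnn rfl
          (fun x hx => hqv x (by simp [hx])) hflag1
      apply ih _ _ _ ⟨R1, R2, Relation.ReflTransGen.trans hstar R3, R6, R7, ?_⟩ ?_
      · intro c hc
        by_cases hcc : c = c0
        · subst hcc
          right
          intro u' v w hEdge hu'
          subst hu'
          obtain ⟨cN, hmem, hidx⟩ := edge_adj nI es hE c0 v w hEdge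
          have := R9 (cN, w) hmem
          rw [hidx] at this
          rw [R5]; exact this
        · by_cases hlt : (pvRelaxB nI ((pvGraph nI es).getD c0 []) (d.getD c0 0)
              (d, q1, inq.set c0 false)).1.getD c 0 < d.getD c 0
          · obtain ⟨x, hx1, hx2⟩ := R10 c hlt
            exact Or.inl ⟨x, hx1, hx2⟩
          · rcases hcover c hc with ⟨x, hxq, hx2⟩ | h
            · left
              rcases List.mem_cons.1 hxq with hxu | hxu
              · exfalso; subst hxu; exact hcc (hc0def.trans hx2).symm
              · exact ⟨x, R8 x hxu, hx2⟩
            · right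
              intro u' v w hEdge hu'
              rw [hu'] at hEdge
              have heqc : (pvRelaxB nI ((pvGraph nI es).getD c0 []) (d.getD c0 0)
                  (d, q1, inq.set c0 false)).1.getD c 0 = d.getD c 0 := by
                have := R4 c; omega
              calc (pvRelaxB nI ((pvGraph nI es).getD c0 []) (d.getD c0 0)
                  (d, q1, inq.set c0 false)).1.getD v 0
                  ≤ d.getD v 0 := R4 v
                _ ≤ d.getD c 0 + w := h c v w hEdge rfl
                _ = _ + w := by rw [heqc]
      · have hs1 : 0 ≤ (pvRelaxB nI ((pvGraph nI es).getD c0 []) (d.getD c0 0)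
            (d, q1, inq.set c0 false)).1.sum := List.sum_nonneg R2
        have hs0 : 0 ≤ d.sum := List.sum_nonneg hnn
        simp only [List.length_cons] at hf
        omega

lemma pvIdx_lt (nI a : Int) (h1 : 1 - nI ≤ a) (h2 : a ≤ nI) (hn : 0 < nI) :
    pvIdx nI (a - 1) < nI.toNat := by
  unfold pvIdx; split_ifs <;> omega

lemma pvIdx_cast (nI : Int) (s : Nat) : pvIdx nI (s : Int) = s := by
  unfold pvIdx; split_ifs <;> omega

lemma d0_getD (k s i : Nat) (hs : s < k) :
    ((List.replicate k (987654321 : Int)).set s 0).getD i 0 =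
      if i = s then 0 else if i < k then 987654321 else 0 := by
  rw [getD_set']
  simp only [List.length_replicate]
  rw [getD_replicate']
  split_ifs <;> omega

lemma d0_facts (k s : Nat) (hs : s < k) :
    ((List.replicate k (987654321 : Int)).set s 0).length = k ∧
    (∀ y ∈ (List.replicate k (987654321 : Int)).set s 0, 0 ≤ y) ∧
    ((List.replicate k (987654321 : Int)).set s 0).sum = (k : Int) * 987654321 - 987654321 := by
  refine ⟨by simp, ?_, ?_⟩
  · intro y hy
    rcases List.mem_or_eq_of_mem_set hy with h | h
    · have := List.eq_of_mem_replicate h; omega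
    · omega
  · rw [sum_set' _ _ _ (by simpa using hs), getD_replicate', if_pos hs]
    simp [List.sum_replicate]

lemma per_start (nI : Int) (es : List (Int × Int × Int)) (hE : pvEOK nI es)
    (s : Nat) (hs : s < nI.toNat) :
    pvDij nI (pvGraph nI es) (2 * 987654321 * nI + 2).toNat
      ((List.replicate nI.toNat (987654321 : Int)).set s 0) [((0 : Int), (s : Int))] =
    pvSPFA nI (pvGraph nI es) (2 * 987654321 * nI + 2).toNat
      ((List.replicate nI.toNat (987654321 : Int)).set s 0) [(s : Int)]
      ((List.replicate nI.toNat false).set s true) := by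
  obtain ⟨hlen, hnn, hsum⟩ := d0_facts nI.toNat s hs
  have hg : ∀ i : Nat, ((List.replicate nI.toNat (987654321 : Int)).set s 0).getD i 0 =
      if i = s then 0 else if i < nI.toNat then 987654321 else 0 := fun i => d0_getD _ s i hs
  have hcov : ∀ c : Nat, c < nI.toNat → c ≠ s →
      ∀ u v w, pvEdge nI es u v w → u = c →
      ((List.replicate nI.toNat (987654321 : Int)).set s 0).getD v 0 ≤
      ((List.replicate nI.toNat (987654321 : Int)).set s 0).getD c 0 + w := by
    intro c hc hcs u v w hEdge hu
    subst hu
    obtain ⟨-, hvlt, hw⟩ := edge_bounds nI es hE u v w hEdge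
    have h1 := hg v
    have h2 := hg u
    rw [h1, h2, if_neg hcs]
    split_ifs <;> omega
  have hInv : pvDInv nI es ((List.replicate nI.toNat (987654321 : Int)).set s 0)
      ((List.replicate nI.toNat (987654321 : Int)).set s 0) [((0 : Int), (s : Int))] := by
    refine ⟨hlen, hnn, Relation.ReflTransGen.refl, ?_, ?_⟩
    · intro p hp
      have hp' : p = ((0 : Int), (s : Int)) := by simpa using hp
      subst hp'
      refine ⟨?_, le_refl _, ?_⟩
      · rw [pvIdx_cast, hg s, if_pos rfl]
      · rw [pvIdx_cast]; exact hs
    · intro c hc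
      by_cases hcs : c = s
      · exact Or.inl ⟨((0 : Int), (s : Int)), by simp,
          by rw [pvIdx_cast]; exact hcs.symm, by rw [hcs, hg s, if_pos rfl]⟩
      · exact Or.inr (hcov c hc hcs)
  have hInvB : pvDInvB nI es ((List.replicate nI.toNat (987654321 : Int)).set s 0)
      ((List.replicate nI.toNat (987654321 : Int)).set s 0) [(s : Int)]
      ((List.replicate nI.toNat false).set s true) := by
    refine ⟨hlen, hnn, Relation.ReflTransGen.refl, ?_, ?_, ?_⟩
    · intro x hx
      have hx' : x = (s : Int) := by simpa using hx
      rw [hx', pvIdx_cast]; exact hs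
    · intro c hcflag
      rw [getD_set'] at hcflag
      split_ifs at hcflag with hvc
      · exact ⟨(s : Int), by simp, by rw [pvIdx_cast]; exact hvc.1⟩
      · rw [getD_replicate'] at hcflag
        split_ifs at hcflag <;> simp at hcflag
    · intro c hc
      by_cases hcs : c = s
      · exact Or.inl ⟨(s : Int), by simp, by rw [pvIdx_cast]; exact hcs.symm⟩
      · exact Or.inr (hcov c hc hcs)
  have hmeas : (2 * ((List.replicate nI.toNat (987654321 : Int)).set s 0).sum).toNat + 1 <
      (2 * 987654321 * nI + 2).toNat := by omega
  have hA := dij_good nI es hE _ (2 * 987654321 * nI + 2).toNat _ _ hInv (by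
    simpa using hmeas)
  have hB := spfa_good nI es hE _ (2 * 987654321 * nI + 2).toNat _ _ _ hInvB (by
    simpa using hmeas)
  exact star_stable_unique nI es _ _ _ hA.1 hB.1 hA.2.1 hB.2.1

lemma mid_eq (dist items : List Int) (m : Int) : ∀ (l : List Nat) (s0 : Int),
    l.foldl (fun s i => if dist.getD i 0 ≤ m then s + items.getD i 0 else s) s0 =
    s0 + ((l.filter (fun i => decide (dist.getD i 0 ≤ m))).map (fun i => items.getD i 0)).sum := by
  intro l
  induction l with
  | nil => intro s0; simp
  | cons a t ih =>
    intro s0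
    by_cases h : dist.getD a 0 ≤ m
    · rw [List.foldl_cons, if_pos h, ih, List.filter_cons, if_pos (by simpa using h)]
      simp only [List.map_cons, List.sum_cons]
      ring
    · rw [List.foldl_cons, if_neg h, ih, List.filter_cons, if_neg (by simpa using h)]

lemma foldl_congr' {α β : Type} (l : List β) (f g : α → β → α)
    (h : ∀ acc x, x ∈ l → f acc x = g acc x) : ∀ acc, l.foldl f acc = l.foldl g acc := by
  induction l with
  | nil => intro acc; rfl
  | cons a t ih =>
    intro acc
    rw [List.foldl_cons, List.foldl_cons, h acc a (by simp)]
    exact ih (fun acc x hx => h acc x (by simp [hx])) _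

-- ===== VERDICT (by name: the statement is the Claim_ definition above) =====
theorem solution_spec : Claim_equal_solution := by
  intro n m r items es hdom hpre
  obtain ⟨hpe, hp0, hpi⟩ := hpre
  show solution n m r items es = solution_alt n m r items es
  by_cases hn : 0 < n
  · have hE : pvEOK n es := by
      intro e he
      obtain ⟨hw, h1, h2, h3, h4⟩ := hpe e he
      exact ⟨hw, pvIdx_lt n e.1 h1 h2 hn, pvIdx_lt n e.2.1 h3 h4 hn⟩
    simp only [solution, solution_alt]
    apply foldl_congr'
    intro acc start hstart
    have hs : start < n.toNat := List.mem_range.1 hstart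
    rw [per_start n es hE start hs, mid_eq, zero_add]
  · have h0 : n.toNat = 0 := by omega
    simp [solution, solution_alt, h0]
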